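-- pv_equiv track=rewrite | github.com/alex-yung-github/AI | 1.8othellopt2/othello_imports.py | findToken
-- ===== SOURCE A (Python) =====
-- def findToken(board, index, token):
--     qboard = makeQuestionBoard(board)
--     qtokenindex = index + 9 + (2 * (int(index/8)+1))
--     indices = []
--     for i in range(9, 12):
--         indices.append((index+i-2, qtokenindex+i))
--         indices.append((index-i+2, qtokenindex-i))
--     indices.append((index+1, qtokenindex+1))
--     indices.append((index-1,qtokenindex-1))
--     final = []
--     for i in indices:
--         qindex = i[1]
--         temp = qboard[qindex:qindex+1]
--         if(temp == token):
--             final.append(i[0])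
--     return final
--
-- def makeQuestionBoard(board):
--     newboard = "???????????" + board + "???????????"
--     count = 1
--     added = 0
--
--     for i in range(10, len(newboard)):
--         if(count == (10)):
--             newboard = newboard[0:i] + "??" + newboard[i:]
--             count = 0
--         count+=1
--     return newboard
-- ===== SOURCE B (Python) =====
-- def findToken(board, index, token):
--     # Build the '?'-padded question board in one linear pass: 11 '?' on each
--     # side, then a "??" separator spliced in before each of the 8-character
--     # chunks that follow the first 19 padded characters.
--     padded = "?" * 11 + board + "?" * 11
--     parts = [padded[:19]]
--     rest = padded[19:]
--     for _ in range((len(board) + 2) // 10 + 1):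
--         parts.append("??")
--         parts.append(rest[:8])
--         rest = rest[8:]
--     parts.append(rest)
--     qb = "".join(parts)
--     # Position of the cell inside the padded board.
--     q = index + 11 + 2 * (index // 8)
--     res = []
--     for d, e in ((7, 9), (-7, -9), (8, 10), (-8, -10), (9, 11), (-9, -11), (1, 1), (-1, -1)):
--         if qb[q + e : q + e + 1] == token:
--             res.append(index + d)
--     return res
-- ===== Notes on version B (the rewrite author's own statement) =====
-- stated objective: faster
-- what changed: B builds the '?'-padded question board in one linear pass (prefix plus a "??" separator spliced before each following 8-character chunk, joined once) instead of A's quadratic loop that re-creates the whole string for every inserted "??", and scans the 8 neighbour offsets from a literal delta table; Pre_ excludes negative indices, a nonsense corner for a board-cell function on which A's value comes from int(index/8) truncating toward zero and negative slices wrapping, while B floor-divides.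
-- outside the precondition, e.g. on findToken('', -2, ''): A returns [-10], B returns []
import Mathlib
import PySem

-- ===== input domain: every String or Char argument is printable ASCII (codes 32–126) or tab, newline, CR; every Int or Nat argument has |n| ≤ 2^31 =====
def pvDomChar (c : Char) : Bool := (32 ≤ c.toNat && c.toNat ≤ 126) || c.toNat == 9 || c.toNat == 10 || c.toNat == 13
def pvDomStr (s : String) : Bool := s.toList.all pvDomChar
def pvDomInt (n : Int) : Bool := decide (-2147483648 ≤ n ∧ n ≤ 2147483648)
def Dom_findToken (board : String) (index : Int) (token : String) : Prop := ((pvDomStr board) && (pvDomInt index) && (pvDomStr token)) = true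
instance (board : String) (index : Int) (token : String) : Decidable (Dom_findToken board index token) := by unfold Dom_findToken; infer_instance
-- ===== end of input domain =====

-- B replaces A's quadratic repeated string-insertion loop by a one-pass chunked
-- build of the padded board and a direct 8-offset scan (objective: faster).

-- ===== PORT A =====
-- newboard[0:i] + "??" + newboard[i:]
def pvIns (s : List Char) (i : Int) : List Char :=
  PySem.List.slice s (some 0) (some i) ++ ['?', '?'] ++ PySem.List.slice s (some i) none

-- loop body of makeQuestionBoard: 'if count == 10: insert, count = 0' then 'count += 1'
def pvStepA (st : List Char × Int) (i : Int) : List Char × Int :=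
  let st' := if st.2 = 10 then (pvIns st.1 i, (0 : Int)) else st
  (st'.1, st'.2 + 1)

def makeQuestionBoard (board : List Char) : List Char :=
  let newboard := "???????????".toList ++ board ++ "???????????".toList
  ((PySem.List.pyRange 10 (newboard.length : Int) 1).foldl pvStepA (newboard, 1)).1

def findToken (board : String) (index : Int) (token : String) : List Int :=
  let qboard := makeQuestionBoard board.toList
  -- int(index/8): float division of |index| ≤ 2^31 by 8 is exact, int() truncates toward 0
  let qtokenindex := index + 9 + 2 * (Int.tdiv index 8 + 1)
  let indices := (PySem.List.pyRange 9 12 1).foldl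
    (fun acc i => (acc ++ [(index + i - 2, qtokenindex + i)]) ++ [(index - i + 2, qtokenindex - i)]) []
  let indices := indices ++ [(index + 1, qtokenindex + 1)]
  let indices := indices ++ [(index - 1, qtokenindex - 1)]
  indices.foldl (fun acc p =>
    if PySem.List.slice qboard (some p.2) (some (p.2 + 1)) = token.toList
    then acc ++ [p.1] else acc) []

-- ===== PORT B =====
-- loop body: parts.append("??"); parts.append(rest[:8]); rest = rest[8:]
def pvStepB (st : List (List Char) × List Char) (_k : Int) : List (List Char) × List Char :=
  ((st.1 ++ [['?', '?']]) ++ [PySem.List.slice st.2 none (some 8)],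
   PySem.List.slice st.2 (some 8) none)

def findToken_alt (board : String) (index : Int) (token : String) : List Int :=
  let padded := List.replicate 11 '?' ++ board.toList ++ List.replicate 11 '?'
  let st := (PySem.List.pyRange 0 (PySem.Int.floordiv ((board.toList.length : Int) + 2) 10 + 1) 1).foldl pvStepB
    ([PySem.List.slice padded none (some 19)], PySem.List.slice padded (some 19) none)
  let qb := (st.1 ++ [st.2]).flatten
  let q := index + 11 + 2 * PySem.Int.floordiv index 8
  ([((7 : Int), (9 : Int)), (-7, -9), (8, 10), (-8, -10), (9, 11), (-9, -11), (1, 1), (-1, -1)]).foldl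
    (fun acc de =>
      if PySem.List.slice qb (some (q + de.2)) (some (q + de.2 + 1)) = token.toList
      then acc ++ [index + de.1] else acc) []

-- ===== PRECONDITION & SPEC =====
-- Pre_ excludes negative indices (A still returns there): a negative cell index is a
-- nonsense corner for a board-position function, and A's value there is an accident of
-- int(index/8) truncating toward zero plus Python's negative-slice wraparound; B's
-- natural floor division differs on part of that corner.
def Pre_findToken (board : String) (index : Int) (token : String) : Prop := 0 ≤ index
instance (board : String) (index : Int) (token : String) : Decidable (Pre_findToken board index token) := by unfold Pre_findToken; infer_instance

def pvWitness_findToken : String × Int × String := ("xoxoxoxo", 3, "o")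

def Spec_findToken (board : String) (index : Int) (token : String) (out : List Int) : Prop := out = findToken_alt board index token
instance (board : String) (index : Int) (token : String) (out : List Int) : Decidable (Spec_findToken board index token out) := by unfold Spec_findToken; infer_instance

-- ===== CLAIM (what is proved, stated in full; the proofs are below) =====
def Claim_equal_findToken : Prop := ∀ (board : String) (index : Int) (token : String), Dom_findToken board index token → Pre_findToken board index token → Spec_findToken board index token (findToken board index token)

-- ===== LEMMAS AND PROOFS =====

-- recursion view of A's insertion loop: state = (string, count), fuel = remaining iterations
def loopA : List Char → Int → Int → Nat → List Char
  | s, _, _, 0 => s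
  | s, c, i, m + 1 => if c = 10 then loopA (pvIns s i) 1 (i + 1) m else loopA s (c + 1) (i + 1) m

-- the sequence of "??" insertions A performs: at positions i, i+10, i+20, …
def loopIns : List Char → Int → Nat → List Char
  | s, _, 0 => s
  | s, i, t + 1 => loopIns (pvIns s i) (i + 10) t

-- B's chunked build: t separators "??", one before every 8 characters
def jc : List Char → Nat → List Char
  | r, 0 => r
  | r, t + 1 => '?' :: '?' :: (r.take 8 ++ jc (r.drop 8) t)

theorem pvIns_natCast (s : List Char) (i : Nat) :
    pvIns s (i : Int) = s.take i ++ '?' :: '?' :: s.drop i := by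
  simp [pvIns, PySem.List.slice_to_natCast, PySem.List.slice_from_natCast]

-- A's foldl over range(i, i+m) is loopA with fuel m
theorem foldA_eq_loopA (m : Nat) : ∀ (s : List Char) (c i : Int),
    ((PySem.List.pyRange i (i + m) 1).foldl pvStepA (s, c)).1 = loopA s c i m := by
  induction m with
  | zero => intro s c i; simp [loopA]
  | succ m ih =>
    intro s c i
    have hlt : i < i + (m + 1 : Nat) := by omega
    rw [PySem.List.pyRange_one_cons hlt]
    have harg : i + ((m + 1 : Nat) : Int) = (i + 1) + (m : Nat) := by push_cast; ring
    rw [List.foldl_cons, harg]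
    by_cases hc : c = 10
    · have : pvStepA (s, c) i = (pvIns s i, 1) := by simp [pvStepA, hc]
      rw [this, ih]; simp [loopA, hc]
    · have : pvStepA (s, c) i = (s, c + 1) := by simp [pvStepA, hc]
      rw [this, ih]; simp [loopA, hc]

-- counting stalls: fewer than 11 - c iterations never insert
theorem loopA_stall (m : Nat) : ∀ (c : Int) (s : List Char) (i : Int),
    (m : Int) + c ≤ 10 → loopA s c i m = s := by
  induction m with
  | zero => intro c s i _; rfl
  | succ m ih =>
    intro c s i h
    have hc : c ≠ 10 := by omega
    rw [loopA, if_neg hc]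
    exact ih (c + 1) s (i + 1) (by push_cast at h ⊢; omega)

-- running from count 10 - k: k + 1 iterations reach the insertion at i + k
theorem loopA_run (k : Nat) : ∀ (s : List Char) (i : Int) (m : Nat), k ≤ 9 →
    loopA s (10 - (k : Int)) i (m + k + 1) = loopA (pvIns s (i + k)) 1 (i + k + 1) m := by
  induction k with
  | zero => intro s i m _; simp [loopA]
  | succ k ih =>
    intro s i m hk
    have hc : (10 : Int) - ((k + 1 : Nat) : Int) ≠ 10 := by push_cast; omega
    have hm : m + (k + 1) + 1 = (m + k + 1) + 1 := by omega
    rw [hm, loopA, if_neg hc]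
    have harg : (10 : Int) - ((k + 1 : Nat) : Int) + 1 = 10 - (k : Int) := by push_cast; ring
    rw [harg, ih s (i + 1) m (by omega)]
    congr 2 <;> push_cast <;> ring

theorem loopA_ten (s : List Char) (i : Int) (m : Nat) :
    loopA s 1 i (m + 10) = loopA (pvIns s (i + 9)) 1 (i + 10) m := by
  have h := loopA_run 9 s i m (by omega)
  norm_num at h
  rw [show m + 10 = m + 9 + 1 by omega, h]
  congr 1; ring

-- loopA with initial count 1 performs exactly m / 10 insertions, 10 apart, first at i + 9
theorem loopA_eq_loopIns (m : Nat) : ∀ (s : List Char) (i : Int),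
    loopA s 1 i m = loopIns s (i + 9) (m / 10) := by
  induction m using Nat.strong_induction_on with
  | _ m ih =>
    intro s i
    by_cases h : m < 10
    · rw [loopA_stall m 1 s i (by omega)]
      have : m / 10 = 0 := by omega
      rw [this]; rfl
    · obtain ⟨m', rfl⟩ : ∃ m', m = m' + 10 := ⟨m - 10, by omega⟩
      rw [loopA_ten, ih m' (by omega)]
      have : (m' + 10) / 10 = m' / 10 + 1 := by omega
      rw [this, loopIns]
      congr 1; ring

-- closed form of the insertion cascade: chunking
theorem loopIns_closed (t : Nat) : ∀ (s : List Char) (i : Nat), i + 8 * t ≤ s.length →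
    loopIns s (i : Int) (t + 1) = s.take i ++ jc (s.drop i) (t + 1) := by
  induction t with
  | zero =>
    intro s i h
    simp only [loopIns, pvIns_natCast, jc]
    simp
  | succ t ih =>
    intro s i h
    have hi : i ≤ s.length := by omega
    have hlen : (s.take i).length = i := by simp; omega
    rw [loopIns, pvIns_natCast]
    have harg : (i : Int) + 10 = ((i + 10 : Nat) : Int) := by push_cast; ring
    rw [harg, ih _ (i + 10) (by simp [List.length_drop]; omega)]
    have htake : (s.take i ++ '?' :: '?' :: s.drop i).take (i + 10)
        = s.take i ++ '?' :: '?' :: (s.drop i).take 8 := by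
      rw [show i + 10 = (s.take i).length + 10 by omega, List.take_length_add_append]
      rfl
    have hdrop : (s.take i ++ '?' :: '?' :: s.drop i).drop (i + 10)
        = (s.drop i).drop 8 := by
      rw [show i + 10 = (s.take i).length + 10 by omega, List.drop_length_add_append]
      rfl
    rw [htake, hdrop]
    simp [jc]

-- A's makeQuestionBoard, in closed form
theorem makeQuestionBoard_closed (bd : List Char) :
    makeQuestionBoard bd
      = (List.replicate 11 '?' ++ bd ++ List.replicate 11 '?').take 19
        ++ jc ((List.replicate 11 '?' ++ bd ++ List.replicate 11 '?').drop 19)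
            ((bd.length + 2) / 10 + 1) := by
  have hrep : "???????????".toList = List.replicate 11 '?' := by decide
  have h : makeQuestionBoard bd
      = (List.foldl pvStepA (List.replicate 11 '?' ++ bd ++ List.replicate 11 '?', 1)
          (PySem.List.pyRange 10 (((List.replicate 11 '?' ++ bd ++ List.replicate 11 '?').length : Nat) : Int) 1)).1 := by
    simp only [makeQuestionBoard, hrep]
  rw [h]
  set s := List.replicate 11 '?' ++ bd ++ List.replicate 11 '?' with hs
  have hlen : s.length = bd.length + 22 := by simp [hs]
  have harg : ((s.length : Nat) : Int) = (10 : Int) + ((bd.length + 12 : Nat) : Int) := by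
    rw [hlen]; push_cast; ring
  rw [harg, foldA_eq_loopA, loopA_eq_loopIns]
  have ht : (bd.length + 12) / 10 = (bd.length + 2) / 10 + 1 := by omega
  rw [ht]
  have h19 : (10 : Int) + 9 = ((19 : Nat) : Int) := by norm_num
  rw [h19, loopIns_closed _ s 19 (by rw [hlen]; omega)]

-- B's foldl builds exactly the chunking jc
theorem foldB_eq_jc (t : Nat) : ∀ (a : Int) (out : List (List Char)) (r : List Char),
    (let st := (PySem.List.pyRange a (a + t) 1).foldl pvStepB (out, r)
     (st.1 ++ [st.2]).flatten) = out.flatten ++ jc r t := by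
  induction t with
  | zero => intro a out r; simp [jc]
  | succ t ih =>
    intro a out r
    have hlt : a < a + (t + 1 : Nat) := by omega
    rw [PySem.List.pyRange_one_cons hlt]
    have harg : a + ((t + 1 : Nat) : Int) = (a + 1) + (t : Nat) := by push_cast; ring
    rw [List.foldl_cons, harg]
    have hstep : pvStepB (out, r) a = ((out ++ [['?', '?']]) ++ [r.take 8], r.drop 8) := by
      simp [pvStepB]
      constructor
      · have := PySem.List.slice_to_natCast (xs := r) (b := 8); simpa using this
      · have := PySem.List.slice_from_natCast (xs := r) (a := 8); simpa using this
    rw [hstep, ih]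
    simp [jc]

-- int(index/8) and index // 8 agree for 0 ≤ index
theorem tdiv_eq_floordiv_of_nonneg (index : Int) (h : 0 ≤ index) :
    Int.tdiv index 8 = PySem.Int.floordiv index 8 := by
  rw [PySem.Int.floordiv_eq_ediv_of_pos (by norm_num), Int.tdiv_eq_ediv_of_nonneg h]

-- ===== VERDICT (by name: the statement is the Claim_ definition above) =====
theorem findToken_spec : Claim_equal_findToken := by
  intro board index token _ hpre
  unfold Spec_findToken
  show findToken board index token = findToken_alt board index token
  simp only [findToken, findToken_alt]
  set bd := board.toList with hbd
  set s := List.replicate 11 '?' ++ bd ++ List.replicate 11 '?' with hs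
  -- the loop count of B, as a natural number
  have hn : PySem.Int.floordiv ((bd.length : Int) + 2) 10 + 1
      = (((bd.length + 2) / 10 + 1 : Nat) : Int) := by
    rw [show ((bd.length : Int) + 2) = ((bd.length + 2 : Nat) : Int) by push_cast; ring,
       show (10 : Int) = ((10 : Nat) : Int) by norm_num, PySem.Int.floordiv_natCast]
    push_cast; ring
  -- the two padded boards coincide
  have h19a : PySem.List.slice s none (some 19) = s.take 19 := by
    have := PySem.List.slice_to_natCast (xs := s) (b := 19); simpa using this
  have h19b : PySem.List.slice s (some 19) none = s.drop 19 := by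
    have := PySem.List.slice_from_natCast (xs := s) (a := 19); simpa using this
  have hfold := foldB_eq_jc ((bd.length + 2) / 10 + 1) 0 [s.take 19] (s.drop 19)
  rw [show (0 : Int) + (((bd.length + 2) / 10 + 1 : Nat) : Int)
        = (((bd.length + 2) / 10 + 1 : Nat) : Int) by ring] at hfold
  simp only [List.flatten_cons, List.flatten_nil, List.append_nil] at hfold
  have hqb : ((List.foldl pvStepB
        ([PySem.List.slice s none (some 19)], PySem.List.slice s (some 19) none)
        (PySem.List.pyRange 0 (PySem.Int.floordiv ((bd.length : Int) + 2) 10 + 1) 1)).1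
      ++ [(List.foldl pvStepB
        ([PySem.List.slice s none (some 19)], PySem.List.slice s (some 19) none)
        (PySem.List.pyRange 0 (PySem.Int.floordiv ((bd.length : Int) + 2) 10 + 1) 1)).2]).flatten
      = makeQuestionBoard bd := by
    rw [hn, h19a, h19b, makeQuestionBoard_closed, ← hs]
    exact hfold
  rw [hqb]
  -- the two centre positions coincide
  have hq : index + 9 + 2 * (Int.tdiv index 8 + 1)
      = index + 11 + 2 * PySem.Int.floordiv index 8 := by
    rw [tdiv_eq_floordiv_of_nonneg index hpre]; ring
  rw [hq]
  -- both 8-neighbour scans are now folds of identical steps over matching literals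
  rw [show PySem.List.pyRange 9 12 1 = [9, 10, 11] by decide]
  simp only [List.nil_append, List.cons_append, List.append_assoc,
    List.foldl_cons, List.foldl_nil]
  ring_nf
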